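-- pv_equiv track=rewrite | github.com/FIU-MoRA-Lab/Hypercube-RAG-FIU | qa_rag_CF.py | build_context_from_docs
-- ===== SOURCE A (Python) =====
-- from typing import Dict, List, Any
--
-- def build_context_from_docs(doc_ids: List[int], corpus: List[str], max_chars: int = 6000) -> str:
--     """
--     Concatenate the selected documents into a single context string,
--     truncated to max_chars to avoid over-long prompts.
--     """
--     chunks = []
--     current_len = 0
--     for doc_id in doc_ids:
--         if 0 <= doc_id < len(corpus):
--             text = corpus[doc_id].strip()
--             if not text:
--                 continue
--             if current_len + len(text) + 50 > max_chars:  # +50 for separators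
--                 break
--             chunks.append(f"[DOC {doc_id}]\n{text}")
--             current_len += len(text) + 50
--     return "\n\n".join(chunks)
-- ===== SOURCE B (Python) =====
-- def build_context_from_docs(doc_ids, corpus, max_chars=6000):
--     # Phase 1: collect valid, non-empty candidate docs.
--     docs = [(i, corpus[i].strip()) for i in doc_ids if 0 <= i < len(corpus)]
--     docs = [(i, t) for (i, t) in docs if t]
--     # Phase 2: prefix sums of weights (len + 50 separator allowance).
--     sums, total = [], 0
--     for _, t in docs:
--         total += len(t) + 50
--         sums.append(total)
--     # Phase 3: the sums are strictly increasing, so the kept prefix is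
--     # exactly the count of prefix sums not exceeding max_chars.
--     cut = sum(1 for s in sums if s <= max_chars)
--     return "\n\n".join(f"[DOC {i}]\n{t}" for i, t in docs[:cut])
-- ===== Notes on version B (the rewrite author's own statement) =====
-- stated objective: alternative
-- what changed: Replaces A's single stateful loop with break by a three-phase pipeline: filter valid non-empty docs, compute prefix sums of weights, then count how many prefix sums fit in max_chars and join that prefix.
import Mathlib
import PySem

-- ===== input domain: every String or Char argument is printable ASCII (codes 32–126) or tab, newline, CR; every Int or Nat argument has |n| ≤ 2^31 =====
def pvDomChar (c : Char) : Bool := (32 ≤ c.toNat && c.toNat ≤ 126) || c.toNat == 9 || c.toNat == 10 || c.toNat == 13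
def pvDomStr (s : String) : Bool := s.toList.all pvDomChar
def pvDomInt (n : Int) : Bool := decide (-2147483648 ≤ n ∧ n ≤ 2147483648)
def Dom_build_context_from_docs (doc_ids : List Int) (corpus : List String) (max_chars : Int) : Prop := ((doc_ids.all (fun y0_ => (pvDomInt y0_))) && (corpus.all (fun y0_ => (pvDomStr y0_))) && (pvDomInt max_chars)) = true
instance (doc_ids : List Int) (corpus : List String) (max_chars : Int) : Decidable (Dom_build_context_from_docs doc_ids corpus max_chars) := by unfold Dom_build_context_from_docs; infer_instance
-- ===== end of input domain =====

-- ===== PORT A =====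
-- B changes decomposition only: filter + prefix-sums + count instead of one stateful loop with break; same cost.
-- A's loop: carries (chunks, current_len); 'break' returns the chunks accumulated so far.
def pvLoopA (corpus : List String) (max_chars : Int) :
    List Int → List String → Int → List String
  | [], chunks, _ => chunks
  | i :: rest, chunks, cur =>
    if 0 ≤ i ∧ i < (corpus.length : Int) then
      let text := PySem.Str.strip ((PySem.List.pyGet? corpus i).getD "")
      if text = "" then pvLoopA corpus max_chars rest chunks cur
      else if cur + (PySem.Str.len text : Int) + 50 > max_chars then chunks
      else pvLoopA corpus max_chars rest
            (chunks ++ ["[DOC " ++ PySem.Int.toStr i ++ "]\n" ++ text])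
            (cur + (PySem.Str.len text : Int) + 50)
    else pvLoopA corpus max_chars rest chunks cur

def build_context_from_docs (doc_ids : List Int) (corpus : List String) (max_chars : Int) : String :=
  PySem.Str.join "\n\n" (pvLoopA corpus max_chars doc_ids [] 0)

-- ===== PORT B =====
-- prefix sums of weights len t + 50 (Source B phase 2 loop)
def pvSumsB : List (Int × String) → Int → List Int
  | [], _ => []
  | (_, t) :: rest, total =>
    let total' := total + (PySem.Str.len t : Int) + 50
    total' :: pvSumsB rest total'

def build_context_from_docs_alt (doc_ids : List Int) (corpus : List String) (max_chars : Int) : String :=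
  let docs0 := (doc_ids.filter (fun i => decide (0 ≤ i ∧ i < (corpus.length : Int)))).map
      (fun i => (i, PySem.Str.strip ((PySem.List.pyGet? corpus i).getD "")))
  let docs := docs0.filter (fun p => !(p.2 == ""))
  let sums := pvSumsB docs 0
  let cut := sums.countP (fun s => decide (s ≤ max_chars))
  -- docs[:cut] with cut a nonnegative count = take
  PySem.Str.join "\n\n" ((docs.take cut).map (fun p => "[DOC " ++ PySem.Int.toStr p.1 ++ "]\n" ++ p.2))

-- ===== PRECONDITION & SPEC =====
def Spec_build_context_from_docs (doc_ids : List Int) (corpus : List String) (max_chars : Int) (out : String) : Prop := out = build_context_from_docs_alt doc_ids corpus max_chars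
instance (doc_ids : List Int) (corpus : List String) (max_chars : Int) (out : String) : Decidable (Spec_build_context_from_docs doc_ids corpus max_chars out) := by unfold Spec_build_context_from_docs; infer_instance

-- ===== CLAIM =====
def Claim_equal_build_context_from_docs : Prop := ∀ (doc_ids : List Int) (corpus : List String) (max_chars : Int), Dom_build_context_from_docs doc_ids corpus max_chars → Spec_build_context_from_docs doc_ids corpus max_chars (build_context_from_docs doc_ids corpus max_chars)

-- ===== LEMMAS AND PROOFS =====
-- B's docs list for a given id list
def pvDocs (corpus : List String) (ids : List Int) : List (Int × String) :=
  ((ids.filter (fun i => decide (0 ≤ i ∧ i < (corpus.length : Int)))).map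
      (fun i => (i, PySem.Str.strip ((PySem.List.pyGet? corpus i).getD "")))).filter
    (fun p => !(p.2 == ""))

def pvFmt (p : Int × String) : String := "[DOC " ++ PySem.Int.toStr p.1 ++ "]\n" ++ p.2

-- takewhile-style reference loop over the candidate list
def pvTakeB (max_chars : Int) : List (Int × String) → Int → List String
  | [], _ => []
  | p :: rest, cur =>
    if cur + (PySem.Str.len p.2 : Int) + 50 > max_chars then []
    else pvFmt p :: pvTakeB max_chars rest (cur + (PySem.Str.len p.2 : Int) + 50)

lemma pvDocs_cons (corpus : List String) (i : Int) (ids : List Int) :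
    pvDocs corpus (i :: ids) =
      (if 0 ≤ i ∧ i < (corpus.length : Int) then
        (if PySem.Str.strip ((PySem.List.pyGet? corpus i).getD "") = "" then []
         else [(i, PySem.Str.strip ((PySem.List.pyGet? corpus i).getD ""))])
       else []) ++ pvDocs corpus ids := by
  simp only [pvDocs, List.filter_cons]
  split_ifs with h1 h2 <;> simp_all

lemma pvLoopA_eq_takeB (corpus : List String) (max_chars : Int) :
    ∀ (ids : List Int) (chunks : List String) (cur : Int),
      pvLoopA corpus max_chars ids chunks cur =
        chunks ++ pvTakeB max_chars (pvDocs corpus ids) cur := by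
  intro ids
  induction ids with
  | nil => intro chunks cur; simp [pvLoopA, pvDocs, pvTakeB]
  | cons i rest ih =>
    intro chunks cur
    rw [pvDocs_cons]
    simp only [pvLoopA]
    split_ifs with h1 h2 h3
    · rw [List.nil_append]; exact ih chunks cur
    · rw [List.singleton_append, pvTakeB, if_pos h3, List.append_nil]
    · rw [List.singleton_append, pvTakeB, if_neg h3, ih, List.append_assoc,
        List.singleton_append]
      rfl
    · rw [List.nil_append]; exact ih chunks cur

lemma mem_pvSumsB :
    ∀ (ds : List (Int × String)) (total s : Int), s ∈ pvSumsB ds total → total ≤ s := by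
  intro ds
  induction ds with
  | nil => intro total s hs; simp [pvSumsB] at hs
  | cons p rest ih =>
    intro total s hs
    obtain ⟨i, t⟩ := p
    have hl : 0 ≤ PySem.Str.len t := by simp
    simp only [pvSumsB, List.mem_cons] at hs
    rcases hs with h | h
    · omega
    · have h1 := ih _ _ h; omega

lemma pvTakeB_eq_count (max_chars : Int) :
    ∀ (ds : List (Int × String)) (cur : Int),
      pvTakeB max_chars ds cur =
        (ds.take ((pvSumsB ds cur).countP (fun s => decide (s ≤ max_chars)))).map pvFmt := by
  intro ds
  induction ds with
  | nil => intro cur; simp [pvTakeB, pvSumsB]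
  | cons p rest ih =>
    intro cur
    obtain ⟨i, t⟩ := p
    simp only [pvTakeB, pvSumsB, List.countP_cons]
    by_cases h : cur + (PySem.Str.len t : Int) + 50 > max_chars
    · rw [if_pos h]
      have hz : (pvSumsB rest (cur + (PySem.Str.len t : Int) + 50)).countP
          (fun s => decide (s ≤ max_chars)) = 0 := by
        rw [List.countP_eq_zero]
        intro s hs
        have := mem_pvSumsB rest _ s hs
        simp only [decide_eq_true_eq]; omega
      have hc : decide (cur + (PySem.Str.len t : Int) + 50 ≤ max_chars) = false := by
        simp only [decide_eq_false_iff_not]; omega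
      rw [hz, hc]
      simp
    · have hc : decide (cur + (PySem.Str.len t : Int) + 50 ≤ max_chars) = true := by
        simp only [decide_eq_true_eq]; omega
      rw [if_neg h, hc, ih]
      simp

-- ===== VERDICT =====
theorem build_context_from_docs_spec : Claim_equal_build_context_from_docs := by
  intro doc_ids corpus max_chars _
  unfold Spec_build_context_from_docs build_context_from_docs build_context_from_docs_alt
  rw [pvLoopA_eq_takeB, pvTakeB_eq_count]
  rfl
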